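-- pv_equiv track=rewrite | github.com/ChinmayMittal/COL215 | Software Assignments/Assignment-3/file.py | expand_region
-- ===== SOURCE A (Python) =====
-- def split_term_string(term):
--     """
--         "abc'" => [ "a", "b", "c'" ]
--     """
--     if(len(term) == 1):
--         return [term]
--     elif(len(term) == 2 and term[1] == "'"):
--         return [term]
--     else:
--         if(term[1] == "'"):
--             return [term[0:2]] + split_term_string(term[2:])
--         else:
--             return [term[0:1]] + split_term_string(term[1:])
--
-- def value_list_to_all_terms(value_list, i):
--     if( i == len(value_list)):
--         return [""]
--     else:
--         temp_ans = value_list_to_all_terms(value_list, i+1)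
--         if( value_list[i] == 0):
--             return [chr(97+i) + "'" + t for t in temp_ans ]
--         elif( value_list[i] == 1):
--             return [chr(97+i) + t for t in temp_ans ]
--         else:
--             return [chr(97+i) + "'" + t for t in temp_ans ] + [chr (97+i) + t for t in temp_ans ]
--
-- def expand_region( term, original_term):
--     list_of_all_vars = split_term_string(original_term)
--     list_of_fixed_vars = split_term_string(term)
--     value_list = [ 0 for i in range(len(list_of_all_vars))]
--     j = 0
--     for i in range(len(list_of_all_vars)):
--         if( j < len(list_of_fixed_vars) and list_of_all_vars[i][0] == list_of_fixed_vars[j][0] ):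
--             value_list[i] = 1 if (len(list_of_fixed_vars[j]) == 1) else 0
--             j += 1
--         else:
--             value_list[i] = None
--     return value_list_to_all_terms(value_list, 0)
-- ===== SOURCE B (Python) =====
-- def expand_region(term, original_term):
--     # iterative tokenizer + left-to-right prefix accumulation (A recurses right-to-left over a 0/1/None value list)
--     def tokens(s):
--         out = []
--         i = 0
--         while i < len(s):
--             if i + 1 < len(s) and s[i + 1] == "'":
--                 out.append(s[i:i + 2])
--                 i += 2
--             else:
--                 out.append(s[i])
--                 i += 1
--         return out
--     fixed = tokens(term)
--     j = 0
--     prefixes = [""]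
--     for i, tok in enumerate(tokens(original_term)):
--         letter = chr(97 + i)
--         if j < len(fixed) and tok[0] == fixed[j][0]:
--             opts = [letter] if len(fixed[j]) == 1 else [letter + "'"]
--             j += 1
--         else:
--             opts = [letter + "'", letter]
--         prefixes = [p + o for p in prefixes for o in opts]
--     return prefixes
-- ===== Notes on version B (the rewrite author's own statement) =====
-- stated objective: alternative
-- what changed: B replaces A's recursive parser + intermediate 0/1/None value list + right-to-left recursive expansion with an iterative tokenizer and a single left-to-right pass that accumulates the minterm prefixes directly (an iterative product fold).
-- crash fix: On an empty term or empty original_term A raises IndexError inside split_term_string; B returns the natural value (full expansion for an empty term, [''] for an empty original_term). — e.g. on expand_region("", "ab"): A raises IndexError, B returns ["a'b'", "a'b", "ab'", "ab"]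
import Mathlib
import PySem

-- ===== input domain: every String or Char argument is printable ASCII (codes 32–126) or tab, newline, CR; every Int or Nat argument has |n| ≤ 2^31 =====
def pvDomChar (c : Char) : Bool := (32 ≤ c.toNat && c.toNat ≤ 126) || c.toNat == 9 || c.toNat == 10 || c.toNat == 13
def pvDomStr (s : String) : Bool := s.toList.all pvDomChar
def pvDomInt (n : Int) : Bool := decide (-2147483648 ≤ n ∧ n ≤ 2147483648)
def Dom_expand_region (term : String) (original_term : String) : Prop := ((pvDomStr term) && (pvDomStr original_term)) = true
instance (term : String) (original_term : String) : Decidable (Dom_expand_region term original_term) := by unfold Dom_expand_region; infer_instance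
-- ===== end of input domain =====

-- B re-decomposes A: iterative tokenizer and one left-to-right prefix-accumulating pass instead of
-- A's recursive parser, 0/1/None value list and right-to-left recursive expansion (objective: alternative).

-- ===== PORT A =====
-- split_term_string; on [] Python raises IndexError (excluded by Pre_), the port returns [].
def splitTermA : List Char → List (List Char)
  | [] => []
  | [c] => [[c]]
  | c :: d :: rest =>
    if rest.isEmpty && (d = '\'') then [[c, d]]
    else if d = '\'' then [c, d] :: splitTermA rest
    else [c] :: splitTermA (d :: rest)

-- A's for-loop building value_list (entry i assigned once per i; j is the second pointer).
-- Python v[0] on the always-nonempty token is ported as headD ' '.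
def buildVL : List (List Char) → List (List Char) → Nat → List (Option Nat)
  | [], _, _ => []
  | v :: rest, fixed, j =>
    match fixed[j]? with
    | some f =>
      if v.headD ' ' = f.headD ' ' then
        (if f.length = 1 then some 1 else some 0) :: buildVL rest fixed (j + 1)
      else none :: buildVL rest fixed j
    | none => none :: buildVL rest fixed j

-- value_list_to_all_terms (recursion over the suffix of value_list, as in A).
def vlToTerms : List (Option Nat) → Nat → List (List Char)
  | [], _ => [[]]
  | v :: rest, i =>
    let temp := vlToTerms rest (i + 1)
    let letter := Char.ofNat (97 + i)
    match v with
    | some 0 => temp.map (fun t => letter :: '\'' :: t)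
    | some 1 => temp.map (fun t => letter :: t)
    | _ => temp.map (fun t => letter :: '\'' :: t) ++ temp.map (fun t => letter :: t)

def expand_region (term : String) (original_term : String) : List String :=
  let list_of_all_vars := splitTermA original_term.toList
  let list_of_fixed_vars := splitTermA term.toList
  (vlToTerms (buildVL list_of_all_vars list_of_fixed_vars 0) 0).map String.ofList

-- ===== PORT B =====
-- Source B's while-loop tokenizer, ported as recursion on the remaining characters.
def tokensB : List Char → List (List Char)
  | [] => []
  | [c] => [[c]]
  | c :: q :: rest =>
    if q = '\'' then [c, q] :: tokensB rest
    else [c] :: tokensB (q :: rest)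

-- Source B's single for-loop: per token choose the option fragments and extend every prefix.
def expandLoopB : List (List Char) → List (List Char) → Nat → Nat → List (List Char) → List (List Char)
  | [], _, _, _, prefixes => prefixes
  | tok :: rest, fixed, i, j, prefixes =>
    let letter := Char.ofNat (97 + i)
    match fixed[j]? with
    | some f =>
      if tok.headD ' ' = f.headD ' ' then
        let opts := if f.length = 1 then [[letter]] else [[letter, '\'']]
        expandLoopB rest fixed (i + 1) (j + 1) (prefixes.flatMap (fun p => opts.map (fun o => p ++ o)))
      else
        expandLoopB rest fixed (i + 1) j (prefixes.flatMap (fun p => [[letter, '\''], [letter]].map (fun o => p ++ o)))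
    | none =>
      expandLoopB rest fixed (i + 1) j (prefixes.flatMap (fun p => [[letter, '\''], [letter]].map (fun o => p ++ o)))

def expand_region_alt (term : String) (original_term : String) : List String :=
  (expandLoopB (tokensB original_term.toList) (tokensB term.toList) 0 0 [[]]).map String.ofList

-- ===== PRECONDITION & SPEC =====
-- Pre_ excludes exactly the inputs where A raises: split_term_string hits IndexError on the empty string.
def Pre_expand_region (term : String) (original_term : String) : Prop :=
  term ≠ "" ∧ original_term ≠ ""
instance (term : String) (original_term : String) : Decidable (Pre_expand_region term original_term) := by
  unfold Pre_expand_region; infer_instance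

def pvWitness_expand_region : String × String := ("ab'", "ab'c")

-- On an empty term or empty original_term A raises IndexError inside split_term_string; B returns the
-- natural value (full expansion for an empty term, [""] for an empty original_term).
def Raises_expand_region (term : String) (original_term : String) : Prop :=
  term = "" ∨ original_term = ""
instance (term : String) (original_term : String) : Decidable (Raises_expand_region term original_term) := by
  unfold Raises_expand_region; infer_instance
def pvRaiseWitness_expand_region : String × String := ("", "ab")
def pvRaiseWitnessOut_expand_region : List String := ["a'b'", "a'b", "ab'", "ab"]

def Spec_expand_region (term : String) (original_term : String) (out : List String) : Prop :=
  out = expand_region_alt term original_term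
instance (term : String) (original_term : String) (out : List String) : Decidable (Spec_expand_region term original_term out) := by
  unfold Spec_expand_region; infer_instance

-- ===== CLAIM (what is proved, stated in full; the proofs are below) =====
def Claim_equal_expand_region : Prop := ∀ (term : String) (original_term : String), Dom_expand_region term original_term → Pre_expand_region term original_term → Spec_expand_region term original_term (expand_region term original_term)

def Claim_raises_expand_region : Prop := (∀ (term : String) (original_term : String), Dom_expand_region term original_term → Raises_expand_region term original_term → ¬ Pre_expand_region term original_term) ∧ (Dom_expand_region (pvRaiseWitness_expand_region.1) (pvRaiseWitness_expand_region.2) ∧ Raises_expand_region (pvRaiseWitness_expand_region.1) (pvRaiseWitness_expand_region.2) ∧ expand_region_alt (pvRaiseWitness_expand_region.1) (pvRaiseWitness_expand_region.2) = pvRaiseWitnessOut_expand_region)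

-- ===== LEMMAS AND PROOFS =====

-- The two tokenizers agree on every character list.
theorem tokens_eq : ∀ (l : List Char), splitTermA l = tokensB l
  | [] => rfl
  | [_] => rfl
  | c :: d :: rest => by
    simp only [splitTermA, tokensB]
    cases rest with
    | nil => by_cases h : d = '\'' <;> simp [h, splitTermA, tokensB]
    | cons e rs =>
      by_cases h : d = '\'' <;>
        simp [h, tokens_eq (e :: rs), tokens_eq (d :: e :: rs)]
termination_by l => l.length

-- B's fused loop equals: extend every prefix with every term of A's expansion of the value list.
theorem loop_eq :
    ∀ (toks fixed : List (List Char)) (i j : Nat) (P : List (List Char)),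
      expandLoopB toks fixed i j P
        = P.flatMap (fun p => (vlToTerms (buildVL toks fixed j) i).map (fun t => p ++ t)) := by
  intro toks
  induction toks with
  | nil => intro fixed i j P; simp [expandLoopB, buildVL, vlToTerms]
  | cons tok rest ih =>
    intro fixed i j P
    simp only [expandLoopB, buildVL]
    cases hf : fixed[j]? with
    | none =>
      rw [ih]
      simp [vlToTerms, List.flatMap_assoc, List.map_map, Function.comp_def, List.append_assoc]
    | some f =>
      by_cases hh : tok.headD ' ' = f.headD ' '
      · simp only [hh, if_true]
        rw [ih]
        by_cases hl : f.length = 1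
        · simp [hl, vlToTerms, List.flatMap_assoc, List.map_map, Function.comp_def, List.append_assoc]
        · simp [hl, vlToTerms, List.flatMap_assoc, List.map_map, Function.comp_def, List.append_assoc]
      · simp only [hh, if_false]
        rw [ih]
        simp [vlToTerms, List.flatMap_assoc, List.map_map, Function.comp_def, List.append_assoc]

-- ===== VERDICT (by name: the statement is the Claim_ definition above) =====
theorem expand_region_spec : Claim_equal_expand_region := by
  intro term original_term _ _
  unfold Spec_expand_region expand_region expand_region_alt
  rw [loop_eq, tokens_eq, tokens_eq]
  simp

theorem expand_region_raises : Claim_raises_expand_region := by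
  unfold Claim_raises_expand_region
  refine ⟨?_, by decide⟩
  intro term original_term _ hr hp
  rcases hr with h | h <;> [exact hp.1 h; exact hp.2 h]

-- self-check that the raise-witness value is the one B's port computes (uses the raises theorem)
theorem raise_witness_ok :
    expand_region_alt (pvRaiseWitness_expand_region.1) (pvRaiseWitness_expand_region.2)
      = pvRaiseWitnessOut_expand_region :=
  expand_region_raises.2.2.2
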